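-- pv_equiv track=rewrite | github.com/alius33/icarus | backend/app/services/thread_writeback.py | _find_section_boundaries
-- ===== SOURCE A (Python) =====
-- VALID_STATUSES = ["OPEN", "WATCHING", "CLOSED"]
--
-- def _find_section_boundaries(lines: list[str]) -> dict[str, tuple[int, int]]:
--     """Find start/end line indices for each ## STATUS section.
--
--     Returns dict like {"OPEN": (start, end), "WATCHING": (start, end), ...}
--     where start is the line of the ## heading and end is the line before the
--     next ## heading (or end of file).
--     """
--     sections: dict[str, tuple[int, int]] = {}
--     current_section = None
--     current_start = 0
--
--     for i, line in enumerate(lines):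
--         stripped = line.strip()
--         if stripped.startswith("## "):
--             # Close previous section
--             if current_section:
--                 sections[current_section] = (current_start, i - 1)
--
--             heading = stripped[3:].strip().upper()
--             for status in VALID_STATUSES:
--                 if status in heading:
--                     current_section = status
--                     current_start = i
--                     break
--             else:
--                 current_section = None
--
--     # Close last section
--     if current_section:
--         sections[current_section] = (current_start, len(lines) - 1)
--
--     return sections
-- ===== SOURCE B (Python) =====
-- VALID_STATUSES = ["OPEN", "WATCHING", "CLOSED"]
--
-- def _status_of(heading):
--     for status in VALID_STATUSES:
--         if status in heading:
--             return status
--     return None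
--
-- def _find_section_boundaries(lines):
--     # Pass 1: one record per '## ' heading line: (line index, status or None).
--     headings = []
--     for i, line in enumerate(lines):
--         stripped = line.strip()
--         if stripped.startswith("## "):
--             headings.append((i, _status_of(stripped[3:].strip().upper())))
--     # Pass 2: each status heading's section ends just before the next heading
--     # of any kind, or at the last line.
--     sections = {}
--     for j, (i, status) in enumerate(headings):
--         if status is not None:
--             end = headings[j + 1][0] - 1 if j + 1 < len(headings) else len(lines) - 1
--             sections[status] = (i, end)
--     return sections
-- ===== Notes on version B (the rewrite author's own statement) =====
-- stated objective: alternative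
-- what changed: B replaces A's single stateful scan (carrying current_section/current_start and closing sections on the fly) by two passes: first collect all '## ' heading records (index, detected status), then emit each status section's range from the next heading record's index.
import Mathlib
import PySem

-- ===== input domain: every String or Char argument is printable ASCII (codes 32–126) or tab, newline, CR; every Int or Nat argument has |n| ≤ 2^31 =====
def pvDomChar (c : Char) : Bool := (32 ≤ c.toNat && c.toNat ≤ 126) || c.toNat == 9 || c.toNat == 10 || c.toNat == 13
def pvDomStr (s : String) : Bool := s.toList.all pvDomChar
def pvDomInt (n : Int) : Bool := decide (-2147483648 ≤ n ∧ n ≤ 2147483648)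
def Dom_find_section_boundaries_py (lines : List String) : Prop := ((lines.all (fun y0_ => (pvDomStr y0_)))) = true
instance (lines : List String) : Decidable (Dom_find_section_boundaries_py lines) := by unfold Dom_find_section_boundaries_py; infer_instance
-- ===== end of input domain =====

-- B differs from A by decomposition only: two passes over heading records instead of one stateful scan.

def pvValidStatuses : List String := ["OPEN", "WATCHING", "CLOSED"]

-- ===== PORT A =====
-- One stateful scan: (sections, current_section, current_start); the inner
-- for/break over VALID_STATUSES is the first match, List.find?.
def pvStepA (st : PySem.Dict String (Int × Int) × Option String × Int)
    (p : Int × String) : PySem.Dict String (Int × Int) × Option String × Int :=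
  let stripped := PySem.Str.strip p.2
  if PySem.Str.startswith stripped "## " then
    let sections1 := match st.2.1 with
      | some s => st.1.insert s (st.2.2, p.1 - 1)
      | none => st.1
    let heading := PySem.Str.upper (PySem.Str.strip (PySem.Str.slice stripped (some 3) none))
    match pvValidStatuses.find? (fun s => PySem.Str.isIn s heading) with
    | some s => (sections1, some s, p.1)
    | none => (sections1, none, st.2.2)
  else st

def find_section_boundaries_py (lines : List String) : List (String × Int × Int) :=
  (match (PySem.List.enumerate lines).foldl pvStepA (PySem.Dict.empty, none, 0) with
    | (sections, some s, start) => sections.insert s (start, (lines.length : Int) - 1)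
    | (sections, none, _) => sections).items

-- ===== PORT B =====
-- Pass 1 helper: first VALID_STATUS contained in the heading, if any.
def pvStatusOf (heading : String) : Option String :=
  pvValidStatuses.find? (fun s => PySem.Str.isIn s heading)

-- Pass 1 helper: the heading record of one enumerated line, if it is a heading.
def pvRecOf (p : Int × String) : Option (Int × Option String) :=
  let stripped := PySem.Str.strip p.2
  if PySem.Str.startswith stripped "## " then
    some (p.1, pvStatusOf (PySem.Str.upper (PySem.Str.strip (PySem.Str.slice stripped (some 3) none))))
  else none

-- Pass 1: one record per '## ' heading line.
def pvHeadings (lines : List String) : List (Int × Option String) :=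
  (PySem.List.enumerate lines).filterMap pvRecOf

-- Pass 2: Source B's loop over headings with lookahead headings[j+1].
def pvEmit (n : Int) (sections : PySem.Dict String (Int × Int)) :
    List (Int × Option String) → PySem.Dict String (Int × Int)
  | [] => sections
  | (i, st) :: rest =>
    let e : Int := match rest with
      | (j, _) :: _ => j - 1
      | [] => n - 1
    pvEmit n (match st with
      | some s => sections.insert s (i, e)
      | none => sections) rest

def find_section_boundaries_py_alt (lines : List String) : List (String × Int × Int) :=
  (pvEmit (lines.length : Int) PySem.Dict.empty (pvHeadings lines)).items

-- ===== PRECONDITION & SPEC =====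
def Spec_find_section_boundaries_py (lines : List String) (out : List (String × Int × Int)) : Prop := out = find_section_boundaries_py_alt lines
instance (lines : List String) (out : List (String × Int × Int)) : Decidable (Spec_find_section_boundaries_py lines out) := by unfold Spec_find_section_boundaries_py; infer_instance

-- ===== CLAIM (what is proved, stated in full; the proofs are below) =====
def Claim_equal_find_section_boundaries_py : Prop := ∀ (lines : List String), Dom_find_section_boundaries_py lines → Spec_find_section_boundaries_py lines (find_section_boundaries_py lines)

-- ===== LEMMAS AND PROOFS =====

-- A's step restricted to heading records.
def pvStepH (st : PySem.Dict String (Int × Int) × Option String × Int)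
    (r : Int × Option String) : PySem.Dict String (Int × Int) × Option String × Int :=
  let sections1 := match st.2.1 with
    | some s => st.1.insert s (st.2.2, r.1 - 1)
    | none => st.1
  match r.2 with
  | some s => (sections1, some s, r.1)
  | none => (sections1, none, st.2.2)

def pvClose (n : Int) (st : PySem.Dict String (Int × Int) × Option String × Int) :
    PySem.Dict String (Int × Int) :=
  match st.2.1 with
  | some s => st.1.insert s (st.2.2, n - 1)
  | none => st.1

-- A's step on one line is its heading record's restricted step (or a no-op).
theorem pv_stepA_recOf (st : PySem.Dict String (Int × Int) × Option String × Int) (p : Int × String) :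
    pvStepA st p = (match pvRecOf p with
      | some r => pvStepH st r
      | none => st) := by
  unfold pvStepA pvRecOf pvStatusOf pvStepH
  by_cases h : PySem.Str.startswith (PySem.Str.strip p.2) "## " = true
  · simp only [h, if_pos]
  · simp only [h, Bool.false_eq_true, if_neg, not_false_iff]

-- A's fold over enumerated lines is the restricted fold over the heading records.
theorem pv_fold_headings' (ps : List (Int × String)) (st : PySem.Dict String (Int × Int) × Option String × Int) :
    ps.foldl pvStepA st = (ps.filterMap pvRecOf).foldl pvStepH st := by
  induction ps generalizing st with
  | nil => rfl
  | cons p ps ih =>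
    rw [List.foldl_cons, List.filterMap_cons, pv_stepA_recOf]
    cases pvRecOf p with
    | some r => rw [List.foldl_cons]; exact ih _
    | none => exact ih st

theorem pv_fold_headings (lines : List String) (st : PySem.Dict String (Int × Int) × Option String × Int) :
    (PySem.List.enumerate lines).foldl pvStepA st = (pvHeadings lines).foldl pvStepH st :=
  pv_fold_headings' _ st

-- When no section is open, the carried start index is irrelevant.
theorem pv_start_irrel (H : List (Int × Option String)) (d : PySem.Dict String (Int × Int))
    (s1 s2 n : Int) :
    pvClose n (H.foldl pvStepH (d, none, s1)) = pvClose n (H.foldl pvStepH (d, none, s2)) := by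
  induction H generalizing d s1 s2 with
  | nil => rfl
  | cons r rest ih =>
    simp only [List.foldl_cons, pvStepH]
    cases r.2 with
    | some s => rfl
    | none => exact ih d s1 s2

-- Main invariant: closing A's fold equals B's emit with the open section prepended.
theorem pv_fold_emit (H : List (Int × Option String)) (d : PySem.Dict String (Int × Int))
    (cur : Option String) (start n : Int) :
    pvClose n (H.foldl pvStepH (d, cur, start)) = pvEmit n d ((start, cur) :: H) := by
  induction H generalizing d cur start with
  | nil =>
    cases cur <;> rfl
  | cons r rest ih =>
    obtain ⟨j, st2⟩ := r
    simp only [List.foldl_cons, pvStepH, pvEmit]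
    cases st2 with
    | some s =>
      cases cur with
      | some c => exact ih _ _ _
      | none => exact ih _ _ _
    | none =>
      cases cur with
      | some c =>
        rw [pv_start_irrel rest _ start j n]
        exact ih _ _ _
      | none =>
        rw [pv_start_irrel rest _ start j n]
        exact ih _ _ _

-- ===== VERDICT (by name: the statement is the Claim_ definition above) =====
theorem find_section_boundaries_py_spec : Claim_equal_find_section_boundaries_py := by
  intro lines _
  unfold Spec_find_section_boundaries_py find_section_boundaries_py find_section_boundaries_py_alt
  rw [pv_fold_headings]
  have h := pv_fold_emit (pvHeadings lines) PySem.Dict.empty none 0 (lines.length : Int)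
  simp only [pvEmit] at h
  rw [← h]
  generalize (pvHeadings lines).foldl pvStepH (PySem.Dict.empty, none, 0) = x
  obtain ⟨d, cur, start⟩ := x
  cases cur <;> rfl
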